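-- pv_equiv track=rewrite | github.com/senzing-garage/sz-sdk-python | src/senzing_abstract/szerror.py | get_message_level
-- ===== SOURCE A (Python) =====
-- def get_message_level(error_id: int) -> str:
--     """
--     Determine the severity of the error.
--
--     :meta private:
--     """
--     error_levels = {
--         6000: "PANIC",
--         5000: "FATAL",
--         4000: "ERROR",
--         3000: "WARN",
--         2000: "INFO",
--         1000: "DEBUG",
--         0: "TRACE",
--     }
--     for error_level, error_message in error_levels.items():
--         if error_id > error_level:
--             return error_message
--     return "PANIC"
-- ===== SOURCE B (Python) =====
-- def get_message_level(error_id: int) -> str: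
--     if error_id <= 0 or error_id > 6000:
--         return "PANIC"
--     return ["TRACE", "DEBUG", "INFO", "WARN", "ERROR", "FATAL"][(error_id - 1) // 1000]
-- ===== Notes on version B (the rewrite author's own statement) =====
-- stated objective: simpler
-- what changed: Replaced the descending-threshold scan over a dict with two extreme guards plus a closed-form arithmetic index (error_id-1)//1000 into a level table.
import Mathlib
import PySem

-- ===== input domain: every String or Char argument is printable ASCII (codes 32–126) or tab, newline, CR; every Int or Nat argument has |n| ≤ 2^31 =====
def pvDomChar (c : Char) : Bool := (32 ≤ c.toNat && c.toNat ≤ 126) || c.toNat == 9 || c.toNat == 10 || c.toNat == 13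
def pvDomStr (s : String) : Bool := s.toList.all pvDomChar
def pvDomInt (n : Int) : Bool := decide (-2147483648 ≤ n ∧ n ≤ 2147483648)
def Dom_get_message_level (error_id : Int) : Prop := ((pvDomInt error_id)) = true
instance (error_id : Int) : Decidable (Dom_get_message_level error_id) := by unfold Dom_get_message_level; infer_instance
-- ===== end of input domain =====

-- B replaces A's descending-threshold scan with two extreme guards and a closed-form
-- arithmetic index into a level table (objective: simpler).


-- ===== PORT A =====
-- the dict literal, in insertion order, as A's loop iterates it
def pvErrorLevels : List (Int × String) :=
  [(6000, "PANIC"), (5000, "FATAL"), (4000, "ERROR"), (3000, "WARN"),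
   (2000, "INFO"), (1000, "DEBUG"), (0, "TRACE")]

-- A's for-loop: first entry with error_id > threshold; fall through to "PANIC"
def pvScan (error_id : Int) : List (Int × String) → String
  | [] => "PANIC"
  | (lvl, msg) :: rest => if error_id > lvl then msg else pvScan error_id rest

def get_message_level (error_id : Int) : String :=
  pvScan error_id pvErrorLevels

-- ===== PORT B =====
def get_message_level_alt (error_id : Int) : String :=
  if error_id ≤ 0 ∨ error_id > 6000 then "PANIC"
  else (PySem.List.pyGet? ["TRACE", "DEBUG", "INFO", "WARN", "ERROR", "FATAL"]
          (PySem.Int.floordiv (error_id - 1) 1000)).getD ""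

-- ===== PRECONDITION & SPEC =====
def Spec_get_message_level (error_id : Int) (out : String) : Prop := out = get_message_level_alt error_id
instance (error_id : Int) (out : String) : Decidable (Spec_get_message_level error_id out) := by unfold Spec_get_message_level; infer_instance

-- ===== CLAIM (what is proved, stated in full; the proofs are below) =====
def Claim_equal_get_message_level : Prop := ∀ (error_id : Int), Dom_get_message_level error_id → Spec_get_message_level error_id (get_message_level error_id)

-- ===== LEMMAS AND PROOFS =====
theorem pv_band (e : Int) (k : Nat) (h1 : (k : Int) * 1000 < e) (h2 : e ≤ (k + 1 : Nat) * 1000) :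
    PySem.Int.floordiv (e - 1) 1000 = (k : Int) := by
  rw [PySem.Int.floordiv_eq_ediv_of_pos (by omega)]
  omega

-- ===== VERDICT (by name: the statement is the Claim_ definition above) =====
theorem get_message_level_spec : Claim_equal_get_message_level := by
  intro e _
  show get_message_level e = get_message_level_alt e
  unfold get_message_level get_message_level_alt pvErrorLevels
  by_cases hA : e > 6000
  · simp [pvScan, hA]
  by_cases h0 : e ≤ 0
  · simp [pvScan, hA,
      show ¬ e > 5000 from by omega, show ¬ e > 4000 from by omega,
      show ¬ e > 3000 from by omega, show ¬ e > 2000 from by omega,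
      show ¬ e > 1000 from by omega, show ¬ e > 0 from by omega]
  by_cases h5 : e > 5000
  · rw [pv_band e 5 (by push_cast; omega) (by push_cast; omega)]
    simp [pvScan, h5, show ¬ e > 6000 from by omega]
    omega
  by_cases h4 : e > 4000
  · rw [pv_band e 4 (by push_cast; omega) (by push_cast; omega)]
    simp [pvScan, h4, show ¬ e > 6000 from by omega, show ¬ e > 5000 from by omega]
    omega
  by_cases h3 : e > 3000
  · rw [pv_band e 3 (by push_cast; omega) (by push_cast; omega)]
    simp [pvScan, h3, show ¬ e > 6000 from by omega, show ¬ e > 5000 from by omega, show ¬ e > 4000 from by omega]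
    omega
  by_cases h2 : e > 2000
  · rw [pv_band e 2 (by push_cast; omega) (by push_cast; omega)]
    simp [pvScan, h2, show ¬ e > 6000 from by omega, show ¬ e > 5000 from by omega, show ¬ e > 4000 from by omega, show ¬ e > 3000 from by omega]
    omega
  by_cases h1b : e > 1000
  · rw [pv_band e 1 (by push_cast; omega) (by push_cast; omega)]
    simp [pvScan, h1b, show ¬ e > 6000 from by omega, show ¬ e > 5000 from by omega, show ¬ e > 4000 from by omega, show ¬ e > 3000 from by omega, show ¬ e > 2000 from by omega]
    omega
  by_cases h0b : e > 0
  · rw [pv_band e 0 (by push_cast; omega) (by push_cast; omega)]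
    simp [pvScan, h0b, show ¬ e > 6000 from by omega, show ¬ e > 5000 from by omega, show ¬ e > 4000 from by omega, show ¬ e > 3000 from by omega, show ¬ e > 2000 from by omega, show ¬ e > 1000 from by omega]
  omega
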